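-- pv_equiv track=rewrite | github.com/gyuelgyuel/Programmers_sol | 프로그래머스/lv0/120863. 다항식 더하기/다항식 더하기.py | solution
-- ===== SOURCE A (Python) =====
-- def solution(polynomial):
--     before = '0'
--     num_list = [0,0]    # [x,상수]
--     for s in polynomial:
--         if s.isdigit():
--             before = before + s
--         if s == "x":
--             if before == '0':
--                 before = '1'
--             num_list[0] += int(before)
--             before = '0'
--         elif s == " ":
--             num_list[1] += int(before)
--             before = '0'
--     num_list[1] += int(before)
--     answer = ''
--     if num_list[0] != 0:
--         if num_list[0] == 1:
--             answer = "x + "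
--         else:
--             answer = str(num_list[0]) + "x + "
--     else:
--         answer = ''
--     if num_list[1] != 0:
--         answer = answer + str(num_list[1])
--     else:
--         answer = answer[:-3]
--
--     return answer
-- ===== SOURCE B (Python) =====
-- def _digits(s):
--     return "".join(ch for ch in s if ch.isdigit())
--
-- def solution(polynomial):
--     x_coef = 0
--     const = 0
--     for chunk in polynomial.split(" "):
--         segs = chunk.split("x")
--         for seg in segs[:-1]:
--             ds = _digits(seg)
--             x_coef += int(ds) if ds else 1
--         ds = _digits(segs[-1])
--         const += int(ds) if ds else 0
--     parts = []
--     if x_coef: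
--         parts.append("x" if x_coef == 1 else str(x_coef) + "x")
--     if const:
--         parts.append(str(const))
--     return " + ".join(parts)
-- ===== Notes on version B (the rewrite author's own statement) =====
-- stated objective: alternative
-- what changed: A runs a character-level state machine (a zero-prefixed digit buffer flushed at each x or space) and post-edits the answer string by slicing three characters off; B splits the input on spaces, splits each chunk on the letter x, digit-filters each piece and converts it with int (an empty piece counts 1 before an x and 0 otherwise), then joins the nonzero formatted parts with the plus separator using str.join.
import Mathlib
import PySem

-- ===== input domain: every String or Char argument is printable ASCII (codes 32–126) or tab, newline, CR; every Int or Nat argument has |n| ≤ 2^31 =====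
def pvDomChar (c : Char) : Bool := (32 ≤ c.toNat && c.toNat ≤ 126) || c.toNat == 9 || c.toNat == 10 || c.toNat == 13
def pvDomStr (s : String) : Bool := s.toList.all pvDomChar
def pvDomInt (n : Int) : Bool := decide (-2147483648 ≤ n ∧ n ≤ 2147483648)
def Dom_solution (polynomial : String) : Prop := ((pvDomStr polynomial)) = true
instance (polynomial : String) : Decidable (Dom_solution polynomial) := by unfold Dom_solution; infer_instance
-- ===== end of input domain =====

-- B replaces A's character-level state machine by nested splits (on ' ', then on 'x') with per-piece
-- digit filtering, and builds the output with " + ".join; return values proved equal on every input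
-- (both programs are total); no argument is mutated.

-- ===== PORT A =====
-- Python's int() is applied by both programs only to nonempty ASCII digit strings (in A the buffer
-- `before` is by construction always '0' followed by digits; in B to a filtered run of digit characters).
-- The digit evaluator inside PySem.Int.ofChars? is private to the prelude and unusable in proofs, so
-- int() is ported by hand for both ports: pvInt? agrees with Python's int() exactly on nonempty all-digit
-- strings (the only arguments it ever receives here) and is none elsewhere.
def pvDigitsVal (cs : List Char) : Int := cs.foldl (fun a c => 10 * a + ((c.toNat : Int) - 48)) 0
def pvInt? (cs : List Char) : Option Int :=
  if !cs.isEmpty && cs.all PySem.Chars.isdigit then some (pvDigitsVal cs) else none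

-- loop body of A: state = (before, num_list[0], num_list[1]); Python's str `before` is carried as a
-- List Char, the two-element list num_list as the pair of its cells.
def solStep (st : List Char × Int × Int) (s : Char) : List Char × Int × Int :=
  let before := if PySem.Chars.strIsdigit [s] then st.1 ++ [s] else st.1   -- if s.isdigit(): before += s
  if s = 'x' then
    let before := if before = ['0'] then ['1'] else before
    (['0'], st.2.1 + (pvInt? before).getD 0, st.2.2)
  else if s = ' ' then
    (['0'], st.2.1, st.2.2 + (pvInt? before).getD 0)
  else (before, st.2.1, st.2.2)

def solution (polynomial : String) : String :=
  let st := polynomial.toList.foldl solStep (['0'], 0, 0)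
  let numx := st.2.1
  let numc := st.2.2 + (pvInt? st.1).getD 0          -- num_list[1] += int(before)
  let answer : List Char :=
    if numx ≠ 0 then
      (if numx = 1 then ['x', ' ', '+', ' '] else PySem.Int.toChars numx ++ ['x', ' ', '+', ' '])
    else []
  let answer2 :=
    if numc ≠ 0 then answer ++ PySem.Int.toChars numc
    else PySem.List.slice answer none (some (-3))    -- answer[:-3]
  String.ofList answer2

-- ===== PORT B =====
def pvDigitsOf (seg : List Char) : List Char :=      -- "".join(ch for ch in seg if ch.isdigit())
  seg.filter PySem.Chars.isdigit

def pvXval (seg : List Char) : Int :=                -- int(ds) if ds else 1, with ds = _digits(seg)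
  if (pvDigitsOf seg).isEmpty then 1 else (pvInt? (pvDigitsOf seg)).getD 0

def pvCval (ds : List Char) : Int :=                 -- int(ds) if ds else 0
  if ds.isEmpty then 0 else (pvInt? ds).getD 0

-- loop body of B: one chunk (piece between spaces); state = (x_coef, const)
def altChunk (z : Int × Int) (chunk : List Char) : Int × Int :=
  let segs := PySem.Chars.splitOn chunk ['x']                                -- chunk.split("x")
  let x1 := (PySem.List.slice segs none (some (-1))).foldl                   -- for seg in segs[:-1]
      (fun acc seg => acc + pvXval seg) z.1
  (x1, z.2 + pvCval (pvDigitsOf (PySem.List.pyGetD segs (-1) [])))           -- segs[-1]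

def solution_alt (polynomial : String) : String :=
  let z := (PySem.Chars.splitOn polynomial.toList [' ']).foldl altChunk (0, 0)  -- polynomial.split(" ")
  let parts : List (List Char) :=
    (if z.1 ≠ 0 then [if z.1 = 1 then ['x'] else PySem.Int.toChars z.1 ++ ['x']] else []) ++
    (if z.2 ≠ 0 then [PySem.Int.toChars z.2] else [])
  String.ofList (PySem.Chars.join [' ', '+', ' '] parts)                        -- " + ".join(parts)

-- ===== PRECONDITION & SPEC =====
def Spec_solution (polynomial : String) (out : String) : Prop := out = solution_alt polynomial
instance (polynomial : String) (out : String) : Decidable (Spec_solution polynomial out) := by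
  unfold Spec_solution; infer_instance

-- ===== CLAIM (what is proved, stated in full; the proofs are below) =====
def Claim_equal_solution : Prop := ∀ (polynomial : String), Dom_solution polynomial → Spec_solution polynomial (solution polynomial)

-- ===== LEMMAS AND PROOFS =====

-- structural single-character splitter and its join (proof-only reference for Python's str.split)
def splitCh (d : Char) : List Char → List (List Char)
  | [] => [[]]
  | c :: rest =>
    if c = d then [] :: splitCh d rest
    else
      match splitCh d rest with
      | [] => [[c]]
      | t :: ts => (c :: t) :: ts

def joinCh (d : Char) : List (List Char) → List Char
  | [] => []
  | [t] => t
  | t :: ts => t ++ d :: joinCh d ts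

lemma splitCh_ne_nil (d : Char) (cs : List Char) : splitCh d cs ≠ [] := by
  induction cs with
  | nil => simp [splitCh]
  | cons c rest ih =>
    by_cases hc : c = d
    · simp [splitCh, hc]
    · cases hrec : splitCh d rest with
      | nil => exact absurd hrec ih
      | cons t ts => simp [splitCh, hc, hrec]

lemma joinCh_cons (d : Char) (t : List Char) (ts : List (List Char)) (h : ts ≠ []) :
    joinCh d (t :: ts) = t ++ d :: joinCh d ts := by
  cases ts with
  | nil => exact absurd rfl h
  | cons a l => rfl

lemma joinCh_splitCh (d : Char) (cs : List Char) : joinCh d (splitCh d cs) = cs := by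
  induction cs with
  | nil => rfl
  | cons c rest ih =>
    by_cases hc : c = d
    · subst hc
      rw [splitCh, if_pos rfl, joinCh_cons _ _ _ (splitCh_ne_nil c rest), ih]
      rfl
    · cases hrec : splitCh d rest with
      | nil => exact absurd hrec (splitCh_ne_nil d rest)
      | cons t ts =>
        rw [hrec] at ih
        rw [splitCh, if_neg hc, hrec]
        show joinCh d ((c :: t) :: ts) = c :: rest
        cases ts with
        | nil => simpa [joinCh] using congrArg (c :: ·) ih
        | cons b l =>
          rw [joinCh_cons _ _ _ (by simp)] at ih
          rw [joinCh_cons _ _ _ (by simp)]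
          rw [← ih]
          simp

lemma splitCh_subset (d : Char) (cs : List Char) :
    ∀ t ∈ splitCh d cs, ∀ a ∈ t, a ∈ cs := by
  induction cs with
  | nil => intro t ht a ha; simp [splitCh] at ht; subst ht; simp at ha
  | cons c rest ih =>
    intro t ht a ha
    by_cases hc : c = d
    · rw [splitCh, if_pos hc] at ht
      rcases List.mem_cons.mp ht with rfl | hm
      · simp at ha
      · exact List.mem_cons_of_mem _ (ih t hm a ha)
    · cases hrec : splitCh d rest with
      | nil => exact absurd hrec (splitCh_ne_nil d rest)
      | cons u us =>
        rw [splitCh, if_neg hc, hrec] at ht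
        rcases List.mem_cons.mp ht with rfl | hm
        · rcases List.mem_cons.mp ha with rfl | hm2
          · simp
          · exact List.mem_cons_of_mem _ (ih u (by rw [hrec]; simp) a hm2)
        · exact List.mem_cons_of_mem _ (ih t (by rw [hrec]; simp [hm]) a ha)

lemma splitCh_no_d (d : Char) (cs : List Char) : ∀ t ∈ splitCh d cs, d ∉ t := by
  induction cs with
  | nil => intro t ht; simp [splitCh] at ht; subst ht; simp
  | cons c rest ih =>
    intro t ht
    by_cases hc : c = d
    · rw [splitCh, if_pos hc] at ht
      rcases List.mem_cons.mp ht with rfl | hm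
      · simp
      · exact ih t hm
    · cases hrec : splitCh d rest with
      | nil => exact absurd hrec (splitCh_ne_nil d rest)
      | cons u us =>
        rw [splitCh, if_neg hc, hrec] at ht
        rcases List.mem_cons.mp ht with rfl | hm
        · intro hmem
          rcases List.mem_cons.mp hmem with rfl | hm2
          · exact hc rfl
          · exact ih u (by rw [hrec]; simp) hm2
        · exact ih t (by rw [hrec]; simp [hm])

-- ---- PySem's splitOn coincides with splitCh for a one-character separator ----
lemma go1_nil (d : Char) (f : Nat) (cur : List Char) (acc : List (List Char)) :
    PySem.Chars.splitOn.go [d] (f + 1) [] cur acc = acc.reverse ++ [cur.reverse] := by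
  simp [PySem.Chars.splitOn.go]

lemma go1_sep (d : Char) (f : Nat) (rest cur : List Char) (acc : List (List Char)) :
    PySem.Chars.splitOn.go [d] (f + 1) (d :: rest) cur acc =
      PySem.Chars.splitOn.go [d] f rest [] (cur.reverse :: acc) := by
  simp [PySem.Chars.splitOn.go, List.isPrefixOf]

lemma go1_step {d c : Char} (hc : c ≠ d) (f : Nat) (rest cur : List Char)
    (acc : List (List Char)) :
    PySem.Chars.splitOn.go [d] (f + 1) (c :: rest) cur acc =
      PySem.Chars.splitOn.go [d] f rest (c :: cur) acc := by
  have hbe : (d == c) = false := by simpa using fun e => hc e.symm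
  simp [PySem.Chars.splitOn.go, List.isPrefixOf, hbe]

lemma go1_splitCh (d : Char) :
    ∀ (cs : List Char) (f : Nat) (cur : List Char) (acc : List (List Char)), cs.length < f →
      PySem.Chars.splitOn.go [d] f cs cur acc =
        acc.reverse ++ ((cur.reverse ++ (splitCh d cs).headI) :: (splitCh d cs).tail) := by
  intro cs
  induction cs with
  | nil =>
    intro f cur acc hf
    obtain ⟨f', rfl⟩ : ∃ f', f = f' + 1 := ⟨f - 1, by omega⟩
    rw [go1_nil]
    simp [splitCh]
  | cons c rest ih =>
    intro f cur acc hf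
    obtain ⟨f', rfl⟩ : ∃ f', f = f' + 1 := ⟨f - 1, by omega⟩
    have hlt : rest.length < f' := by simp at hf; omega
    by_cases hc : c = d
    · subst hc
      rw [go1_sep, ih f' [] (cur.reverse :: acc) hlt]
      cases hrec : splitCh c rest with
      | nil => exact absurd hrec (splitCh_ne_nil c rest)
      | cons t ts => simp [splitCh, hrec]
    · rw [go1_step hc, ih f' (c :: cur) acc hlt]
      cases hrec : splitCh d rest with
      | nil => exact absurd hrec (splitCh_ne_nil d rest)
      | cons t ts => simp [splitCh, hc, hrec]

lemma splitOn_eq_splitCh (d : Char) (cs : List Char) :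
    PySem.Chars.splitOn cs [d] = splitCh d cs := by
  unfold PySem.Chars.splitOn
  rw [go1_splitCh d cs (cs.length + 1) [] [] (by omega)]
  cases hrec : splitCh d cs with
  | nil => exact absurd hrec (splitCh_ne_nil d cs)
  | cons t ts => simp

-- ---- pvInt? facts ----
lemma pvInt?_digits {ds : List Char} (h : ds.all PySem.Chars.isdigit = true) (hne : ds ≠ []) :
    pvInt? ds = some (pvDigitsVal ds) := by
  simp [pvInt?, h, hne]

lemma pvDigitsVal_zero_cons (ds : List Char) : pvDigitsVal ('0' :: ds) = pvDigitsVal ds := by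
  unfold pvDigitsVal
  rw [List.foldl_cons]
  congr 1

lemma pvInt?_getD_zero_cons {ds : List Char} (h : ds.all PySem.Chars.isdigit = true) (hne : ds ≠ []) :
    (pvInt? ('0' :: ds)).getD 0 = (pvInt? ds).getD 0 := by
  rw [pvInt?_digits (by rw [List.all_cons, h, Bool.and_true]; decide) (by simp),
    pvInt?_digits h hne, pvDigitsVal_zero_cons]

lemma filter_digits_all (seg : List Char) :
    (List.filter PySem.Chars.isdigit seg).all PySem.Chars.isdigit = true := by
  rw [List.all_eq_true]
  intro a ha
  exact (List.mem_filter.mp ha).2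

-- A's pending x-flush value int(before) with before = '0'·ds equals B's `int(ds) if ds else 1`
lemma xflush_eq {ds : List Char} (h : ds.all PySem.Chars.isdigit = true) :
    (pvInt? (if ('0' :: ds) = ['0'] then ['1'] else '0' :: ds)).getD 0 =
      (if ds.isEmpty then 1 else (pvInt? ds).getD 0) := by
  cases ds with
  | nil => decide
  | cons a l =>
    rw [if_neg (by simp), pvInt?_getD_zero_cons h (by simp)]
    rfl

-- A's pending constant flush int(before) with before = '0'·ds equals B's `int(ds) if ds else 0`
lemma cflush_eq {ds : List Char} (h : ds.all PySem.Chars.isdigit = true) :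
    (pvInt? ('0' :: ds)).getD 0 = pvCval ds := by
  cases ds with
  | nil => decide
  | cons a l =>
    rw [pvInt?_getD_zero_cons h (by simp)]
    rfl

-- ---- A's scanner, one step at a time ----
lemma pvDigit_ne {c : Char} (h : PySem.Chars.isdigit c = true) : c ≠ 'x' ∧ c ≠ ' ' := by
  constructor <;> intro e <;> rw [e] at h <;> exact absurd h (by decide)

lemma solStep_digit {d : Char} (h : PySem.Chars.isdigit d = true) (b : List Char) (x c : Int) :
    solStep (b, x, c) d = (b ++ [d], x, c) := by
  obtain ⟨hx, hs⟩ := pvDigit_ne h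
  simp [solStep, PySem.Chars.strIsdigit, h, hx, hs]

lemma solStep_x (b : List Char) (x c : Int) :
    solStep (b, x, c) 'x' =
      (['0'], x + (pvInt? (if b = ['0'] then ['1'] else b)).getD 0, c) := by
  have hd : PySem.Chars.isdigit 'x' = false := by decide
  simp [solStep, PySem.Chars.strIsdigit, hd]

lemma solStep_space (b : List Char) (x c : Int) :
    solStep (b, x, c) ' ' = (['0'], x, c + (pvInt? b).getD 0) := by
  have hd : PySem.Chars.isdigit ' ' = false := by decide
  simp [solStep, PySem.Chars.strIsdigit, hd]

lemma solStep_other {d : Char} (h1 : PySem.Chars.isdigit d = false) (h2 : d ≠ 'x')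
    (h3 : d ≠ ' ') (b : List Char) (x c : Int) : solStep (b, x, c) d = (b, x, c) := by
  simp [solStep, PySem.Chars.strIsdigit, h1, h2, h3]

-- over a piece with no 'x' and no ' ', A appends exactly the digit characters to its buffer
lemma solFold_seg {seg : List Char} (hx : 'x' ∉ seg) (hs : ' ' ∉ seg) :
    ∀ (b : List Char) (x c : Int),
      List.foldl solStep (b, x, c) seg = (b ++ seg.filter PySem.Chars.isdigit, x, c) := by
  induction seg with
  | nil => intro b x c; simp
  | cons d rest ih =>
    intro b x c
    have hx' : 'x' ∉ rest := fun hm => hx (by simp [hm])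
    have hs' : ' ' ∉ rest := fun hm => hs (by simp [hm])
    rcases hd : PySem.Chars.isdigit d with _ | _
    · rw [List.foldl_cons,
        solStep_other hd (fun e => hx (by simp [e])) (fun e => hs (by simp [e])),
        ih hx' hs', List.filter_cons_of_neg (by simp [hd])]
    · rw [List.foldl_cons, solStep_digit hd, ih hx' hs',
        List.filter_cons_of_pos (by simp [hd])]
      simp

lemma pyGetD_last_singleton (s : List Char) :
    PySem.List.pyGetD [s] (-1) ([] : List Char) = s := by
  simp [pysem]

lemma pyGetD_last_cons₂ (s b : List Char) (l : List (List Char)) :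
    PySem.List.pyGetD (s :: b :: l) (-1) ([] : List Char) =
      PySem.List.pyGetD (b :: l) (-1) [] := by
  simp [pysem]

-- A over one chunk (= its 'x'-segments joined by 'x') performs B's inner loop and leaves the last
-- segment's digits pending in the buffer
lemma solFold_chunk :
    ∀ (segs : List (List Char)), segs ≠ [] → (∀ s ∈ segs, 'x' ∉ s ∧ ' ' ∉ s) → ∀ (x c : Int),
      List.foldl solStep (['0'], x, c) (joinCh 'x' segs) =
        ('0' :: (PySem.List.pyGetD segs (-1) []).filter PySem.Chars.isdigit,
          List.foldl (fun acc seg => acc + pvXval seg) x segs.dropLast,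
          c) := by
  intro segs
  induction segs with
  | nil => intro hne; exact absurd rfl hne
  | cons s rest ih =>
    intro _ hfacts x c
    obtain ⟨hsx, hss⟩ := hfacts s (by simp)
    cases rest with
    | nil =>
      rw [show joinCh 'x' [s] = s from rfl, solFold_seg hsx hss, pyGetD_last_singleton]
      rfl
    | cons b l =>
      rw [joinCh_cons _ _ _ (by simp),
        show s ++ 'x' :: joinCh 'x' (b :: l) = (s ++ ['x']) ++ joinCh 'x' (b :: l) by simp,
        List.foldl_append, List.foldl_append, solFold_seg hsx hss,
        List.foldl_cons, List.foldl_nil, solStep_x, List.singleton_append,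
        xflush_eq (filter_digits_all s),
        ih (by simp) (fun u hu => hfacts u (by simp [hu])),
        pyGetD_last_cons₂, List.dropLast_cons₂, List.foldl_cons]
      rfl

-- A over the whole input (= its chunks joined by ' '), plus the final int(before) flush,
-- computes B's fold over the chunks
lemma solFold_chunks :
    ∀ (chunks : List (List Char)), chunks ≠ [] → (∀ t ∈ chunks, ' ' ∉ t) → ∀ (x c : Int),
      ((List.foldl solStep (['0'], x, c) (joinCh ' ' chunks)).2.1,
        (List.foldl solStep (['0'], x, c) (joinCh ' ' chunks)).2.2 +
          (pvInt? (List.foldl solStep (['0'], x, c) (joinCh ' ' chunks)).1).getD 0) =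
        List.foldl altChunk (x, c) chunks := by
  intro chunks
  have hchunk : ∀ (t : List Char), ' ' ∉ t → ∀ (x c : Int),
      List.foldl solStep (['0'], x, c) t =
        ('0' :: (PySem.List.pyGetD (splitCh 'x' t) (-1) []).filter PySem.Chars.isdigit,
          List.foldl (fun acc seg => acc + pvXval seg) x (splitCh 'x' t).dropLast,
          c) := by
    intro t hns x c
    have hfacts : ∀ s ∈ splitCh 'x' t, 'x' ∉ s ∧ ' ' ∉ s := fun s hs =>
      ⟨splitCh_no_d 'x' t s hs, fun hm => hns (splitCh_subset 'x' t s hs ' ' hm)⟩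
    have := solFold_chunk (splitCh 'x' t) (splitCh_ne_nil 'x' t) hfacts x c
    rwa [joinCh_splitCh] at this
  have haltChunk : ∀ (t : List Char) (x c : Int),
      altChunk (x, c) t =
        (List.foldl (fun acc seg => acc + pvXval seg) x (splitCh 'x' t).dropLast,
          c + pvCval ((PySem.List.pyGetD (splitCh 'x' t) (-1) []).filter PySem.Chars.isdigit)) := by
    intro t x c
    simp only [altChunk, splitOn_eq_splitCh, PySem.List.slice_to_neg_one, pvDigitsOf]
  induction chunks with
  | nil => intro hne; exact absurd rfl hne
  | cons t rest ih =>
    intro _ hns x c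
    have hnt : ' ' ∉ t := hns t (by simp)
    cases rest with
    | nil =>
      rw [show joinCh ' ' [t] = t from rfl, hchunk t hnt, List.foldl_cons, List.foldl_nil,
        haltChunk]
      exact Prod.ext rfl (by rw [cflush_eq (filter_digits_all _)])
    | cons b l =>
      rw [joinCh_cons _ _ _ (by simp),
        show t ++ ' ' :: joinCh ' ' (b :: l) = (t ++ [' ']) ++ joinCh ' ' (b :: l) by simp,
        List.foldl_append, List.foldl_append, hchunk t hnt,
        List.foldl_cons, List.foldl_nil, solStep_space,
        cflush_eq (filter_digits_all _), List.foldl_cons, haltChunk]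
      exact ih (by simp) (fun u hu => hns u (by simp [hu])) _ _

-- ---- the two formatting blocks agree for every pair of coefficients ----
lemma join_single (a : List Char) : PySem.Chars.join [' ', '+', ' '] [a] = a := by
  simp [PySem.Chars.join, List.intercalate]

lemma join_pair (a b : List Char) :
    PySem.Chars.join [' ', '+', ' '] [a, b] = a ++ (' ' :: '+' :: ' ' :: b) := by
  simp [PySem.Chars.join, List.intercalate, List.intersperse]

lemma fmt_eq (x c : Int) :
    (if c ≠ 0 then
        (if x ≠ 0 then
            (if x = 1 then ['x', ' ', '+', ' '] else PySem.Int.toChars x ++ ['x', ' ', '+', ' '])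
          else []) ++ PySem.Int.toChars c
      else
        PySem.List.slice
          (if x ≠ 0 then
              (if x = 1 then ['x', ' ', '+', ' '] else PySem.Int.toChars x ++ ['x', ' ', '+', ' '])
            else []) none (some (-3))) =
    PySem.Chars.join [' ', '+', ' ']
      ((if x ≠ 0 then [if x = 1 then ['x'] else PySem.Int.toChars x ++ ['x']] else []) ++
        (if c ≠ 0 then [PySem.Int.toChars c] else [])) := by
  by_cases hx0 : x = 0
  · subst hx0
    by_cases hc : c = 0
    · subst hc; decide
    · simp [hc]
  · by_cases hx1 : x = 1
    · subst hx1
      by_cases hc : c = 0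
      · subst hc; decide
      · simp [hc, join_pair]
    · by_cases hc : c = 0
      · subst hc
        simp only [ne_eq, hx0, not_false_eq_true, if_true, if_neg hx1, not_true_eq_false,
          if_false, List.append_nil]
        rw [PySem.List.slice_to_neg_ofNat _ 3 (by omega), join_single]
        rw [show (PySem.Int.toChars x ++ ['x', ' ', '+', ' ']).length - 3 =
          (PySem.Int.toChars x).length + 1 by simp]
        rw [List.take_append, List.take_of_length_le (by omega),
          show (PySem.Int.toChars x).length + 1 - (PySem.Int.toChars x).length = 1 by omega]
        simp
      · simp [hx0, hx1, hc, join_pair, List.append_assoc]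

-- ===== VERDICT (by name: the statement is the Claim_ definition above) =====
theorem solution_spec : Claim_equal_solution := by
  intro p hD
  unfold Spec_solution
  have hchunks : ∀ t ∈ splitCh ' ' p.toList, ' ' ∉ t := splitCh_no_d ' ' p.toList
  have hfold := solFold_chunks (splitCh ' ' p.toList) (splitCh_ne_nil ' ' p.toList) hchunks 0 0
  rw [joinCh_splitCh] at hfold
  have hx : (List.foldl solStep (['0'], 0, 0) p.toList).2.1 =
      (List.foldl altChunk (0, 0) (splitCh ' ' p.toList)).1 := by rw [← hfold]
  have hc : (List.foldl solStep (['0'], 0, 0) p.toList).2.2 +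
        (pvInt? (List.foldl solStep (['0'], 0, 0) p.toList).1).getD 0 =
      (List.foldl altChunk (0, 0) (splitCh ' ' p.toList)).2 := by rw [← hfold]
  simp only [solution, solution_alt, splitOn_eq_splitCh]
  rw [hx, hc]
  exact congrArg String.ofList (fmt_eq _ _)
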